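-- pv_equiv track=rewrite | github.com/zbennett/bbo-bot-w-extension | bridge-bot/bbo_bot.py | lin_to_card_list
-- ===== SOURCE A (Python) =====
-- def lin_to_card_list(lin_hand):
--     """Convert LIN format (e.g., 'SAKQJHAKDAKCK') to list of cards ['SA', 'SK', 'SQ', ...]"""
--     cards = []
--     current_suit = None
--     for char in lin_hand:
--         if char in 'SHDC':
--             current_suit = char
--         elif current_suit:
--             cards.append(f"{current_suit}{char}")
--     return cards
-- ===== SOURCE B (Python) =====
-- def lin_to_card_list(lin_hand):
--     """Convert LIN format to list of cards via a two-stage group-then-expand pass."""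
--     i, n = 0, len(lin_hand)
--     segs = []
--     while i < n:
--         c = lin_hand[i]
--         i += 1
--         if c in 'SHDC':
--             j = i
--             while j < n and lin_hand[j] not in 'SHDC':
--                 j += 1
--             segs.append((c, lin_hand[i:j]))
--             i = j
--     return [suit + rank for suit, ranks in segs for rank in ranks]
-- ===== Notes on version B (the rewrite author's own statement) =====
-- stated objective: alternative
-- what changed: Replaces the running current_suit char-by-char scan with a two-stage group-then-expand pass: first cut the string into (suit, ranks) segments, then emit suit+rank for each rank in each segment.
import Mathlib
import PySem

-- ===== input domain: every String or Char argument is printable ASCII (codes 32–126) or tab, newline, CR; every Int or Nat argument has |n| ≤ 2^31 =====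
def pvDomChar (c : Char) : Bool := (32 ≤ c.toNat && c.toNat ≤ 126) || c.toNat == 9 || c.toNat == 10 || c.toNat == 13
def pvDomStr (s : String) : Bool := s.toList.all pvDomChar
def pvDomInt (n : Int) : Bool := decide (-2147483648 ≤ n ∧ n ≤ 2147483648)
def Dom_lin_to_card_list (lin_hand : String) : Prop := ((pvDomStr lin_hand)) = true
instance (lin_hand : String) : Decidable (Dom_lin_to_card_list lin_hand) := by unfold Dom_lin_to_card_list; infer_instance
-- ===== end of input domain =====

-- B replaces A's running current_suit char scan by a two-stage group-then-expand pass (alternative decomposition, same cost).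


-- ===== PORT A =====
-- `char in 'SHDC'`
def isSuit (c : Char) : Bool := c == 'S' || c == 'H' || c == 'D' || c == 'C'

-- A's for-loop: state (cards, current_suit); `elif current_suit` = current_suit is not None
def lin_to_card_list (lin_hand : String) : List String :=
  (lin_hand.toList.foldl
    (fun (st : List String × Option Char) char =>
      if isSuit char then (st.1, some char)
      else match st.2 with
        | some s => (st.1 ++ [String.mk [s, char]], st.2)
        | none => st)
    ([], none)).1

-- ===== PORT B =====
-- B's outer while loop: cut the char list into (suit, ranks) segments
def linSegments : List Char → List (Char × List Char)
  | [] => []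
  | c :: cs =>
    if isSuit c then
      (c, cs.takeWhile (fun d => !isSuit d)) :: linSegments (cs.dropWhile (fun d => !isSuit d))
    else linSegments cs
termination_by l => l.length
decreasing_by
  · exact Nat.lt_succ_of_le (List.length_dropWhile_le _ _)
  · exact Nat.lt_succ_self _

-- B's final comprehension: expand each segment
def lin_to_card_list_alt (lin_hand : String) : List String :=
  (linSegments lin_hand.toList).flatMap
    (fun seg => seg.2.map (fun rank => String.mk [seg.1, rank]))

-- ===== PRECONDITION & SPEC =====
def Spec_lin_to_card_list (lin_hand : String) (out : List String) : Prop := out = lin_to_card_list_alt lin_hand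
instance (lin_hand : String) (out : List String) : Decidable (Spec_lin_to_card_list lin_hand out) := by unfold Spec_lin_to_card_list; infer_instance

-- ===== CLAIM (what is proved, stated in full; the proofs are below) =====
def Claim_equal_lin_to_card_list : Prop := ∀ (lin_hand : String), Dom_lin_to_card_list lin_hand → Spec_lin_to_card_list lin_hand (lin_to_card_list lin_hand)

-- ===== LEMMAS AND PROOFS =====

-- A's fold only appends to the accumulator
theorem foldA_acc (cs : List Char) (acc : List String) (st : Option Char) :
    (cs.foldl
      (fun (st : List String × Option Char) char =>
        if isSuit char then (st.1, some char)
        else match st.2 with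
          | some s => (st.1 ++ [String.mk [s, char]], st.2)
          | none => st)
      (acc, st)).1
    = acc ++ (cs.foldl
      (fun (st : List String × Option Char) char =>
        if isSuit char then (st.1, some char)
        else match st.2 with
          | some s => (st.1 ++ [String.mk [s, char]], st.2)
          | none => st)
      ([], st)).1 := by
  induction cs generalizing acc st with
  | nil => simp
  | cons c cs ih =>
    by_cases h : isSuit c = true
    · simp only [List.foldl_cons, if_pos h]
      exact ih acc (some c)
    · cases st with
      | none =>
        simp only [List.foldl_cons, if_neg h]
        exact ih acc none
      | some s =>
        simp only [List.foldl_cons, if_neg h]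
        rw [ih (acc ++ [String.mk [s, c]]) (some s), List.nil_append, ih [String.mk [s, c]] (some s)]
        simp

-- segments skip leading non-suit chars
theorem linSegments_dropWhile (cs : List Char) :
    linSegments (cs.dropWhile (fun d => !isSuit d)) = linSegments cs := by
  induction cs with
  | nil => simp [linSegments]
  | cons c cs ih =>
    by_cases h : isSuit c = true
    · simp [List.dropWhile, h]
    · simp [List.dropWhile, h, linSegments, ih]

-- main invariant: A's fold from state st equals st's pending segment plus B's segments
theorem foldA_eq (cs : List Char) (st : Option Char) :
    (cs.foldl
      (fun (st : List String × Option Char) char =>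
        if isSuit char then (st.1, some char)
        else match st.2 with
          | some s => (st.1 ++ [String.mk [s, char]], st.2)
          | none => st)
      ([], st)).1
    = (match st with
        | some s => (cs.takeWhile (fun d => !isSuit d)).map (fun r => String.mk [s, r])
        | none => [])
      ++ (linSegments cs).flatMap
          (fun seg => seg.2.map (fun rank => String.mk [seg.1, rank])) := by
  induction cs generalizing st with
  | nil => cases st <;> simp [linSegments]
  | cons c cs ih =>
    by_cases h : isSuit c = true
    · have := ih (some c)
      cases st <;>
        simp_all [List.foldl_cons, linSegments, List.takeWhile, linSegments_dropWhile]
    · cases st with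
      | none => simp [List.foldl_cons, h, linSegments, ih none]
      | some s =>
        simp only [List.foldl_cons, if_neg h, List.nil_append]
        rw [foldA_acc _ [String.mk [s, c]] (some s), ih (some s)]
        simp [linSegments, h, List.takeWhile]

-- ===== VERDICT (by name: the statement is the Claim_ definition above) =====
theorem lin_to_card_list_spec : Claim_equal_lin_to_card_list := by
  intro lin_hand _
  unfold Spec_lin_to_card_list lin_to_card_list lin_to_card_list_alt
  simpa using foldA_eq lin_hand.toList none
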